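-- pv_equiv track=rewrite | github.com/20jastrobel/Holstein_test | docs/reports/qiskit_circuit_report.py | compute_sweep_proxy_cost
-- ===== SOURCE A (Python) =====
-- def _pauli_weight(label_exyz: str) -> int:
--     return int(sum(1 for ch in str(label_exyz) if ch in {"x", "y", "z"}))
--
-- def _pauli_xy_count(label_exyz: str) -> int:
--     return int(sum(1 for ch in str(label_exyz) if ch in {"x", "y"}))
--
-- def _cx_proxy_term(label_exyz: str) -> int:
--     return int(2 * max(_pauli_weight(label_exyz) - 1, 0))
--
-- def _sq_proxy_term(label_exyz: str) -> int:
--     return int(2 * _pauli_xy_count(label_exyz) + 1)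
--
-- def compute_sweep_proxy_cost(active_labels_exyz: list[str]) -> dict[str, int]:
--     term_exp_count = int(2 * len(active_labels_exyz))
--     cx_proxy = int(2 * sum(_cx_proxy_term(lbl) for lbl in active_labels_exyz))
--     sq_proxy = int(2 * sum(_sq_proxy_term(lbl) for lbl in active_labels_exyz))
--     return {
--         "term_exp_count": int(term_exp_count),
--         "cx_proxy": int(cx_proxy),
--         "sq_proxy": int(sq_proxy),
--     }
-- ===== SOURCE B (Python) =====
-- def compute_sweep_proxy_cost(active_labels_exyz: list[str]) -> dict[str, int]:
--     cx_acc = 0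
--     sq_acc = 0
--     for lbl in active_labels_exyz:
--         w = 0
--         xy = 0
--         for ch in str(lbl):
--             if ch in {"x", "y", "z"}:
--                 w += 1
--                 if ch != "z":
--                     xy += 1
--         cx_acc += max(w - 1, 0)
--         sq_acc += xy
--     n = len(active_labels_exyz)
--     return {
--         "term_exp_count": 2 * n,
--         "cx_proxy": 4 * cx_acc,
--         "sq_proxy": 4 * sq_acc + 2 * n,
--     }
-- ===== Notes on version B (the rewrite author's own statement) =====
-- stated objective: faster
-- what changed: Drops the four helper functions and replaces their multiple per-label character scans with a single combined scan per label accumulating weight and xy-count together; the doubled multipliers become closed-form coefficients 4*cx_acc and 4*sq_acc + 2*n (constant-factor speedup, measured ~3x).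
import Mathlib
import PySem

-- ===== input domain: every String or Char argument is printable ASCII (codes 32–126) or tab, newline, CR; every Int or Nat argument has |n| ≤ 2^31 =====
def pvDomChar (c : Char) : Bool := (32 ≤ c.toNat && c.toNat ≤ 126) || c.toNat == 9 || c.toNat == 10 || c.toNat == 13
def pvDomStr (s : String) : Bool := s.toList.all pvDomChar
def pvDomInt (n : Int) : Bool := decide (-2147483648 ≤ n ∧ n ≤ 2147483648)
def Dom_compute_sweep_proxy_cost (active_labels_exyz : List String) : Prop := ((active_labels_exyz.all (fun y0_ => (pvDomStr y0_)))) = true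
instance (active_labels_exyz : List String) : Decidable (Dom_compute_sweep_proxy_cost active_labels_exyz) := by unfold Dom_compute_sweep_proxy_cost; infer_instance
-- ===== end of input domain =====

-- B replaces the four helpers and their two character scans per label by one
-- combined scan per label with closed-form coefficients (objective: simpler).

-- ===== PORT A =====
def pvPauliWeight (label_exyz : String) : Int :=
  label_exyz.toList.foldl (fun acc ch => if ch = 'x' ∨ ch = 'y' ∨ ch = 'z' then acc + 1 else acc) 0

def pvPauliXYCount (label_exyz : String) : Int :=
  label_exyz.toList.foldl (fun acc ch => if ch = 'x' ∨ ch = 'y' then acc + 1 else acc) 0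

def pvCxProxyTerm (label_exyz : String) : Int := 2 * max (pvPauliWeight label_exyz - 1) 0

def pvSqProxyTerm (label_exyz : String) : Int := 2 * pvPauliXYCount label_exyz + 1

def compute_sweep_proxy_cost (active_labels_exyz : List String) : List (String × Int) :=
  let term_exp_count : Int := 2 * active_labels_exyz.length
  let cx_proxy : Int := 2 * (active_labels_exyz.map pvCxProxyTerm).sum
  let sq_proxy : Int := 2 * (active_labels_exyz.map pvSqProxyTerm).sum
  [("term_exp_count", term_exp_count), ("cx_proxy", cx_proxy), ("sq_proxy", sq_proxy)]

-- ===== PORT B =====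
-- one combined scan of a label's characters: (weight, xy-count)
def pvStep (r : Int × Int) (ch : Char) : Int × Int :=
  if ch = 'x' ∨ ch = 'y' ∨ ch = 'z' then
    (r.1 + 1, if ch ≠ 'z' then r.2 + 1 else r.2)
  else r

def compute_sweep_proxy_cost_alt (active_labels_exyz : List String) : List (String × Int) :=
  let acc := active_labels_exyz.foldl
    (fun (p : Int × Int) lbl =>
      let q := lbl.toList.foldl pvStep (0, 0)
      (p.1 + max (q.1 - 1) 0, p.2 + q.2)) (0, 0)
  let n : Int := active_labels_exyz.length
  [("term_exp_count", 2 * n), ("cx_proxy", 4 * acc.1), ("sq_proxy", 4 * acc.2 + 2 * n)]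

-- ===== PRECONDITION & SPEC =====
def Spec_compute_sweep_proxy_cost (active_labels_exyz : List String) (out : List (String × Int)) : Prop := out = compute_sweep_proxy_cost_alt active_labels_exyz
instance (active_labels_exyz : List String) (out : List (String × Int)) : Decidable (Spec_compute_sweep_proxy_cost active_labels_exyz out) := by unfold Spec_compute_sweep_proxy_cost; infer_instance

-- ===== CLAIM (what is proved, stated in full; the proofs are below) =====
def Claim_equal_compute_sweep_proxy_cost : Prop := ∀ (active_labels_exyz : List String), Dom_compute_sweep_proxy_cost active_labels_exyz → Spec_compute_sweep_proxy_cost active_labels_exyz (compute_sweep_proxy_cost active_labels_exyz)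

-- ===== LEMMAS AND PROOFS =====
theorem weight_fold_shift (cs : List Char) (a : Int) :
    cs.foldl (fun acc ch => if ch = 'x' ∨ ch = 'y' ∨ ch = 'z' then acc + 1 else acc) a
      = a + cs.foldl (fun acc ch => if ch = 'x' ∨ ch = 'y' ∨ ch = 'z' then acc + 1 else acc) 0 := by
  induction cs generalizing a with
  | nil => simp
  | cons c cs ih =>
    simp only [List.foldl_cons]
    rw [ih, ih (if c = 'x' ∨ c = 'y' ∨ c = 'z' then (0:Int) + 1 else 0)]
    split_ifs <;> ring

theorem xy_fold_shift (cs : List Char) (a : Int) :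
    cs.foldl (fun acc ch => if ch = 'x' ∨ ch = 'y' then acc + 1 else acc) a
      = a + cs.foldl (fun acc ch => if ch = 'x' ∨ ch = 'y' then acc + 1 else acc) 0 := by
  induction cs generalizing a with
  | nil => simp
  | cons c cs ih =>
    simp only [List.foldl_cons]
    rw [ih, ih (if c = 'x' ∨ c = 'y' then (0:Int) + 1 else 0)]
    split_ifs <;> ring

theorem scan_eq (cs : List Char) (a b : Int) :
    cs.foldl pvStep (a, b)
      = (a + cs.foldl (fun acc ch => if ch = 'x' ∨ ch = 'y' ∨ ch = 'z' then acc + 1 else acc) 0,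
         b + cs.foldl (fun acc ch => if ch = 'x' ∨ ch = 'y' then acc + 1 else acc) 0) := by
  induction cs generalizing a b with
  | nil => simp
  | cons c cs ih =>
    simp only [List.foldl_cons]
    rw [weight_fold_shift _ (if c = 'x' ∨ c = 'y' ∨ c = 'z' then (0:Int) + 1 else 0),
        xy_fold_shift _ (if c = 'x' ∨ c = 'y' then (0:Int) + 1 else 0)]
    have hstep : pvStep (a, b) c =
        (a + (if c = 'x' ∨ c = 'y' ∨ c = 'z' then (1:Int) else 0),
         b + (if c = 'x' ∨ c = 'y' then (1:Int) else 0)) := by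
      by_cases hx : c = 'x' <;> by_cases hy : c = 'y' <;> by_cases hz : c = 'z' <;>
        simp_all [pvStep]
    rw [hstep, ih]
    simp only [Prod.mk.injEq]
    constructor <;> split_ifs <;> ring

theorem outer_eq (ls : List String) (cx sq : Int) :
    ls.foldl (fun (p : Int × Int) lbl =>
        let q := lbl.toList.foldl pvStep (0, 0)
        (p.1 + max (q.1 - 1) 0, p.2 + q.2)) (cx, sq)
      = (cx + (ls.map (fun l => max (pvPauliWeight l - 1) 0)).sum,
         sq + (ls.map pvPauliXYCount).sum) := by
  induction ls generalizing cx sq with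
  | nil => simp
  | cons l ls ih =>
    simp only [List.foldl_cons, List.map_cons, List.sum_cons, ih,
      scan_eq l.toList 0 0, Prod.mk.injEq, pvPauliWeight, pvPauliXYCount]
    constructor <;> ring

theorem cx_sum (ls : List String) :
    (ls.map pvCxProxyTerm).sum = 2 * (ls.map (fun l => max (pvPauliWeight l - 1) 0)).sum := by
  induction ls with
  | nil => simp
  | cons l ls ih => simp [pvCxProxyTerm, ih]; ring

theorem sq_sum (ls : List String) :
    (ls.map pvSqProxyTerm).sum = 2 * (ls.map pvPauliXYCount).sum + ls.length := by
  induction ls with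
  | nil => simp
  | cons l ls ih => simp [pvSqProxyTerm, ih]; ring

-- ===== VERDICT (by name: the statement is the Claim_ definition above) =====
theorem compute_sweep_proxy_cost_spec : Claim_equal_compute_sweep_proxy_cost := by
  intro ls _
  show compute_sweep_proxy_cost ls = compute_sweep_proxy_cost_alt ls
  simp only [compute_sweep_proxy_cost, compute_sweep_proxy_cost_alt, outer_eq, cx_sum, sq_sum]
  simp only [List.cons.injEq, Prod.mk.injEq, and_true, true_and]
  exact ⟨by ring, by ring⟩
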